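-- pv_equiv track=rewrite | github.com/sevendollar/python | star_sign.py | star_sign_range
-- ===== SOURCE A (Python) =====
-- def star_sign_range(start, end):
--     star_signs = ['aries', 'taurus', 'gemini', 'cancer', 'leo', 'virgo', 'libra', 'scorpio', 'sagittatius', 'capricorn', 'aquarius', 'pisces']
--     start_index = star_signs.index(start)
--     end_index = star_signs.index(end)
--
--     if (start_index - end_index) <= 0:
--         return tuple(i.capitalize() for i in star_signs[start_index:end_index + 1])
--     else:
--         return tuple(i.capitalize() for i in star_signs[start_index:] + star_signs[:end_index + 1])
-- ===== SOURCE B (Python) =====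
-- def star_sign_range(start, end):
--     star_signs = ['aries', 'taurus', 'gemini', 'cancer', 'leo', 'virgo', 'libra', 'scorpio', 'sagittatius', 'capricorn', 'aquarius', 'pisces']
--     nxt = dict(zip(star_signs, star_signs[1:] + star_signs[:1]))
--     if start not in nxt or end not in nxt:
--         raise ValueError("not a star sign")
--     out = []
--     cur = start
--     while True:
--         out.append(cur.capitalize())
--         if cur == end:
--             break
--         cur = nxt[cur]
--     return tuple(out)
-- ===== Notes on version B (the rewrite author's own statement) =====
-- stated objective: alternative
-- what changed: B replaces A's index lookups and sign-based branch with two slices by a successor-map traversal: it builds a dict mapping each sign to the next sign on the circle and walks from start, appending capitalized names until it reaches end; Pre_ excludes only inputs where A raises ValueError (a string not in the sign list), where B also raises.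
import Mathlib
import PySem

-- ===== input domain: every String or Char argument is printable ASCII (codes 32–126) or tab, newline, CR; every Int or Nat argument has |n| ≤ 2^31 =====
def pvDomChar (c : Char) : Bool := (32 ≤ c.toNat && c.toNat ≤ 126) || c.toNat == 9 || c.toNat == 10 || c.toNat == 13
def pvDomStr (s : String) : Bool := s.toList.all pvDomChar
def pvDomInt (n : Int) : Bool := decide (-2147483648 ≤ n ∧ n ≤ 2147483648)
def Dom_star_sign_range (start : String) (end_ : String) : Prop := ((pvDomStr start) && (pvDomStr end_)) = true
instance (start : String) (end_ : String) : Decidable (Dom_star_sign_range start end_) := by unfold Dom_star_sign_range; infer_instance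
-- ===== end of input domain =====

-- B builds a successor map (each sign -> the next sign on the circle) and walks from start
-- until it reaches end, instead of A's index lookups and sign-based branch with two slices.

-- ===== PORT A =====
-- A-side helper: Python str.capitalize() (exact on ASCII)
def pyCapitalizeA (s : String) : String :=
  match s.toList with
  | [] => ""
  | c :: cs => String.ofList (c.toUpper :: cs.map Char.toLower)

def star_sign_range (start : String) (end_ : String) : List String :=
  let star_signs : List String :=
    ["aries", "taurus", "gemini", "cancer", "leo", "virgo", "libra", "scorpio",
     "sagittatius", "capricorn", "aquarius", "pisces"]
  match PySem.List.index? star_signs start, PySem.List.index? star_signs end_ with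
  | some start_index, some end_index =>
      if (start_index : Int) - (end_index : Int) ≤ 0 then
        (PySem.List.slice star_signs (some (start_index : Int)) (some ((end_index : Int) + 1))).map pyCapitalizeA
      else
        ((PySem.List.slice star_signs (some (start_index : Int)) none ++
          PySem.List.slice star_signs none (some ((end_index : Int) + 1))).map pyCapitalizeA)
  | _, _ => []  -- Python raises ValueError here; excluded by Pre_

-- ===== PORT B =====
-- B-side helper: Python str.capitalize() (exact on ASCII)
def pyCapitalizeB (s : String) : String :=
  match s.toList with
  | [] => ""
  | c :: cs => String.ofList (c.toUpper :: cs.map Char.toLower)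

-- B's while-loop: append cur capitalized; stop at end_; else follow the successor map.
-- Fuel = 12 (the circle's size): with end_ a key of the map the Python loop takes ≤ 12 steps.
def bWalk (nxt : PySem.Dict String String) (end_ : String) (cur : String) (fuel : Nat) : List String :=
  match fuel with
  | 0 => []
  | fuel + 1 =>
    if cur == end_ then [pyCapitalizeB cur]
    else pyCapitalizeB cur :: bWalk nxt end_ (PySem.Dict.getD nxt cur "") fuel

def star_sign_range_alt (start : String) (end_ : String) : List String :=
  let star_signs : List String :=
    ["aries", "taurus", "gemini", "cancer", "leo", "virgo", "libra", "scorpio",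
     "sagittatius", "capricorn", "aquarius", "pisces"]
  let nxt : PySem.Dict String String :=
    PySem.Dict.ofList (star_signs.zip (star_signs.drop 1 ++ star_signs.take 1))
  if nxt.contains start && nxt.contains end_ then
    bWalk nxt end_ start 12
  else []  -- Python raises ValueError here; excluded by Pre_

-- ===== PRECONDITION & SPEC =====
-- Pre_ excludes exactly the inputs on which both A and B raise ValueError (a name not in the sign list).
def Pre_star_sign_range (start : String) (end_ : String) : Prop :=
  start ∈ (["aries", "taurus", "gemini", "cancer", "leo", "virgo", "libra", "scorpio",
            "sagittatius", "capricorn", "aquarius", "pisces"] : List String) ∧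
  end_ ∈ (["aries", "taurus", "gemini", "cancer", "leo", "virgo", "libra", "scorpio",
           "sagittatius", "capricorn", "aquarius", "pisces"] : List String)
instance (start : String) (end_ : String) : Decidable (Pre_star_sign_range start end_) := by unfold Pre_star_sign_range; infer_instance
def pvWitness_star_sign_range : String × String := ("pisces", "taurus")

def Spec_star_sign_range (start : String) (end_ : String) (out : List String) : Prop := out = star_sign_range_alt start end_
instance (start : String) (end_ : String) (out : List String) : Decidable (Spec_star_sign_range start end_ out) := by unfold Spec_star_sign_range; infer_instance

-- ===== CLAIM =====
def Claim_equal_star_sign_range : Prop := ∀ (start : String) (end_ : String), Dom_star_sign_range start end_ → Pre_star_sign_range start end_ → Spec_star_sign_range start end_ (star_sign_range start end_)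

-- ===== LEMMAS AND PROOFS =====

-- ===== VERDICT =====
theorem star_sign_range_spec : Claim_equal_star_sign_range := by
  intro start end_ _ hp
  obtain ⟨hs, he⟩ := hp
  unfold Spec_star_sign_range
  fin_cases hs <;> fin_cases he <;> decide
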